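-- pv_equiv track=rewrite | github.com/Secrettestbot/Super-board-game-game | games/quarto.py | pieces_share_attribute
-- ===== SOURCE A (Python) =====
-- def pieces_share_attribute(pieces):
--     """Check if all pieces in the list share at least one common attribute.
--     Each piece is an int 0-15. Returns True if they share any bit position
--     where all are 1 or all are 0."""
--     if len(pieces) < 2:
--         return False
--     for bit in range(4):
--         mask = 1 << bit
--         vals = [bool(p & mask) for p in pieces]
--         if all(vals) or not any(vals):
--             return True
--     return False
-- ===== SOURCE B (Python) =====
-- def pieces_share_attribute(pieces):
--     """Check if all pieces in the list share at least one common attribute.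
--     Single-pass reduction: AND and OR of all pieces; a set bit in the AND
--     (within the low 4 bits) means a bit where all are 1, a clear bit in the
--     OR means a bit where all are 0."""
--     if len(pieces) < 2:
--         return False
--     and_all, or_all = 0xF, 0
--     for p in pieces:
--         and_all &= p
--         or_all |= p
--     return (and_all & 0xF) != 0 or (or_all & 0xF) != 0xF
-- ===== Notes on version B (the rewrite author's own statement) =====
-- stated objective: simpler
-- what changed: Replaces the 4-iteration outer loop that rebuilds a boolean list over all pieces per bit with a single fold computing the AND and OR of all pieces, followed by one constant-time nibble test.
import Mathlib
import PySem

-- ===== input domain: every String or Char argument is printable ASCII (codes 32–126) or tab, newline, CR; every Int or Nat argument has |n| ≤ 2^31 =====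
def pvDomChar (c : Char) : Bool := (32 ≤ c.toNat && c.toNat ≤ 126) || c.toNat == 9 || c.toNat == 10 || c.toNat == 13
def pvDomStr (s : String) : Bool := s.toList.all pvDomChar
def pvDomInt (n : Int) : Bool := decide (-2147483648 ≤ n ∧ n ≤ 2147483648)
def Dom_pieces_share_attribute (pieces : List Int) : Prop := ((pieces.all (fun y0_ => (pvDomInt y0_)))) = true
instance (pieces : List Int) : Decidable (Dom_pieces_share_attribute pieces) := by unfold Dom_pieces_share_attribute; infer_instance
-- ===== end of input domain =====

-- B replaces A's per-bit passes over the piece list with one AND/OR fold and a constant-time nibble test (same results; simpler).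


-- ===== PORT A =====
def pieces_share_attribute (pieces : List Int) : Bool :=
  if pieces.length < 2 then false
  else
    -- for bit in range(4): ... return True / return False  →  any over [0,1,2,3]
    (PySem.List.pyRange 0 4 1).any (fun bit =>
      let mask : Int := (1 : Int) <<< bit.toNat  -- 1 << bit; bit ∈ {0,1,2,3} so .toNat is exact
      let vals : List Bool := pieces.map (fun p => PySem.Int.band p mask != 0)
      (vals.all (fun v => v) || !(vals.any (fun v => v))))

-- ===== PORT B =====
def pieces_share_attribute_alt (pieces : List Int) : Bool :=
  if pieces.length < 2 then false
  else
    let st := pieces.foldl (fun (st : Int × Int) p => (PySem.Int.band st.1 p, PySem.Int.bor st.2 p)) (15, 0)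
    (PySem.Int.band st.1 15 != 0) || (PySem.Int.band st.2 15 != 15)

-- ===== PRECONDITION & SPEC =====
def Spec_pieces_share_attribute (pieces : List Int) (out : Bool) : Prop := out = pieces_share_attribute_alt pieces
instance (pieces : List Int) (out : Bool) : Decidable (Spec_pieces_share_attribute pieces out) := by unfold Spec_pieces_share_attribute; infer_instance

-- ===== CLAIM (what is proved, stated in full; the proofs are below) =====
def Claim_equal_pieces_share_attribute : Prop := ∀ (pieces : List Int), Dom_pieces_share_attribute pieces → Spec_pieces_share_attribute pieces (pieces_share_attribute pieces)

-- ===== LEMMAS AND PROOFS =====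

-- (m - (m &&& n)) is a borrow-free subtraction: bitwise it is "m and not n".
theorem pv_testBit_sub_and (i : Nat) : ∀ m n : Nat, (m - (m &&& n)).testBit i = (m.testBit i && !(n.testBit i)) := by
  induction i with
  | zero =>
    intro m n
    have hle : m &&& n ≤ m := Nat.and_le_left
    have h0 : ((m &&& n) % 2 = 1) ↔ (m % 2 = 1 ∧ n % 2 = 1) := by
      have := Nat.testBit_and m n 0
      simp only [Nat.testBit_zero] at this
      constructor
      · intro h
        have h' : decide ((m &&& n) % 2 = 1) = true := by simp [h]
        rw [this] at h'
        simp at h'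
        exact h'
      · intro ⟨h1, h2⟩
        have h' : (decide (m % 2 = 1) && decide (n % 2 = 1)) = true := by simp [h1, h2]
        rw [← this] at h'
        simpa using h'
    simp only [Nat.testBit_zero]
    rcases Nat.mod_two_eq_zero_or_one m with hm | hm <;>
      rcases Nat.mod_two_eq_zero_or_one n with hn | hn <;>
        simp [hm, hn] <;> omega
  | succ i ih =>
    intro m n
    rw [Nat.testBit_succ, Nat.testBit_succ, Nat.testBit_succ]
    have hdiv : (m &&& n) / 2 = m / 2 &&& n / 2 := Nat.and_div_two
    have hle : m &&& n ≤ m := Nat.and_le_left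
    have hpar : ((m &&& n) % 2 = 1) ↔ (m % 2 = 1 ∧ n % 2 = 1) := by
      have := Nat.testBit_and m n 0
      simp only [Nat.testBit_zero] at this
      constructor
      · intro h
        have h' : decide ((m &&& n) % 2 = 1) = true := by simp [h]
        rw [this] at h'
        simp at h'
        exact h'
      · intro ⟨h1, h2⟩
        have h' : (decide (m % 2 = 1) && decide (n % 2 = 1)) = true := by simp [h1, h2]
        rw [← this] at h'
        simpa using h'
    have hq : (m - (m &&& n)) / 2 = m / 2 - (m / 2 &&& n / 2) := by
      rcases Nat.mod_two_eq_zero_or_one m with hm | hm <;>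
        rcases Nat.mod_two_eq_zero_or_one n with hn | hn <;> omega
    rw [hq, ih]

theorem pv_negSucc_not_nonneg (m : Nat) : ¬ (0 : Int) ≤ Int.negSucc m := by
  rw [Int.negSucc_eq]; omega

theorem pv_neg_negSucc_sub_one (m : Nat) : (-(Int.negSucc m) - 1).toNat = m := by
  rw [Int.negSucc_eq]; simp

-- band is bitwise AND (two's complement), bor is bitwise OR
theorem pv_testBit_band (a b : Int) (i : Nat) :
    (PySem.Int.band a b).testBit i = (a.testBit i && b.testBit i) := by
  cases a with
  | ofNat m =>
    cases b with
    | ofNat n =>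
      simp [PySem.Int.band, Int.testBit, Nat.testBit_and]
    | negSucc n =>
      simp only [PySem.Int.band, if_pos (Int.natCast_nonneg m),
        if_neg (pv_negSucc_not_nonneg n), pv_neg_negSucc_sub_one, Int.ofNat_eq_natCast, Int.toNat_natCast]
      simp [Int.testBit, pv_testBit_sub_and]
  | negSucc m =>
    cases b with
    | ofNat n =>
      simp only [PySem.Int.band, if_neg (pv_negSucc_not_nonneg m), if_pos (Int.natCast_nonneg n),
        pv_neg_negSucc_sub_one, Int.ofNat_eq_natCast, Int.toNat_natCast]
      simp [Int.testBit, pv_testBit_sub_and, Bool.and_comm]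
    | negSucc n =>
      have h : PySem.Int.band (Int.negSucc m) (Int.negSucc n) = Int.negSucc (m ||| n) := by
        simp only [PySem.Int.band, if_neg (pv_negSucc_not_nonneg m), if_neg (pv_negSucc_not_nonneg n),
          pv_neg_negSucc_sub_one]
        rw [Int.negSucc_eq]; omega
      rw [h]
      simp [Int.testBit, Nat.testBit_or]

theorem pv_testBit_bor (a b : Int) (i : Nat) :
    (PySem.Int.bor a b).testBit i = (a.testBit i || b.testBit i) := by
  cases a with
  | ofNat m =>
    cases b with
    | ofNat n =>
      simp [PySem.Int.bor, Int.testBit, Nat.testBit_or]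
    | negSucc n =>
      have h : PySem.Int.bor (Int.ofNat m) (Int.negSucc n) = Int.negSucc (n - (n &&& m)) := by
        simp only [PySem.Int.bor, if_pos (Int.natCast_nonneg m),
          if_neg (pv_negSucc_not_nonneg n), pv_neg_negSucc_sub_one, Int.ofNat_eq_natCast, Int.toNat_natCast]
        rw [Int.negSucc_eq]; omega
      rw [h]
      simp [Int.testBit, pv_testBit_sub_and]
      cases m.testBit i <;> cases n.testBit i <;> rfl
  | negSucc m =>
    cases b with
    | ofNat n =>
      have h : PySem.Int.bor (Int.negSucc m) (Int.ofNat n) = Int.negSucc (m - (m &&& n)) := by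
        simp only [PySem.Int.bor, if_neg (pv_negSucc_not_nonneg m), if_pos (Int.natCast_nonneg n),
          pv_neg_negSucc_sub_one, Int.ofNat_eq_natCast, Int.toNat_natCast]
        rw [Int.negSucc_eq]; omega
      rw [h]
      simp [Int.testBit, pv_testBit_sub_and]
    | negSucc n =>
      have h : PySem.Int.bor (Int.negSucc m) (Int.negSucc n) = Int.negSucc (m &&& n) := by
        simp only [PySem.Int.bor, if_neg (pv_negSucc_not_nonneg m), if_neg (pv_negSucc_not_nonneg n),
          pv_neg_negSucc_sub_one]
        rw [Int.negSucc_eq]; omega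
      rw [h]
      simp [Int.testBit, Nat.testBit_and]

-- the nibble of x: band x 15 is a natural k < 16 carrying x's four low bits,
-- and band with each single-bit mask is the corresponding nibble band
theorem pv_nibble (x : Int) : ∃ k : Nat, k < 16 ∧ PySem.Int.band x 15 = (k : Int) ∧
    PySem.Int.band x 1 = ((k &&& 1 : Nat) : Int) ∧ PySem.Int.band x 2 = ((k &&& 2 : Nat) : Int) ∧
    PySem.Int.band x 4 = ((k &&& 4 : Nat) : Int) ∧ PySem.Int.band x 8 = ((k &&& 8 : Nat) : Int) ∧
    x.testBit 0 = k.testBit 0 ∧ x.testBit 1 = k.testBit 1 ∧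
    x.testBit 2 = k.testBit 2 ∧ x.testBit 3 = k.testBit 3 := by
  cases x with
  | ofNat m =>
    refine ⟨m &&& 15, by have := Nat.and_le_right (n := m) (m := 15); omega, ?_, ?_, ?_, ?_, ?_, ?_, ?_, ?_, ?_⟩
    · simp [PySem.Int.band]
    · have : m &&& 1 = (m &&& 15) &&& 1 := by rw [Nat.and_assoc]; congr 1
      simp [PySem.Int.band, ← this]
    · have : m &&& 2 = (m &&& 15) &&& 2 := by rw [Nat.and_assoc]; congr 1
      simp [PySem.Int.band, ← this]
    · have : m &&& 4 = (m &&& 15) &&& 4 := by rw [Nat.and_assoc]; congr 1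
      simp [PySem.Int.band, ← this]
    · have : m &&& 8 = (m &&& 15) &&& 8 := by rw [Nat.and_assoc]; congr 1
      simp [PySem.Int.band, ← this]
    all_goals simp [Int.testBit, Nat.testBit_and,
      show Nat.testBit 15 1 = true from rfl,
      show Nat.testBit 15 2 = true from rfl, show Nat.testBit 15 3 = true from rfl]
  | negSucc m =>
    have hsw : ∀ c : Nat, c &&& 15 = c → c &&& m = c &&& (m &&& 15) := by
      intro c hc
      conv_lhs => rw [← hc, Nat.and_assoc]
      rw [Nat.and_comm 15 m]
    have ht : m &&& 15 ≤ 15 := Nat.and_le_right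
    have hband : ∀ c : Nat, PySem.Int.band (Int.negSucc m) (c : Int) = ((c - (c &&& m) : Nat) : Int) := by
      intro c
      simp only [PySem.Int.band, if_neg (pv_negSucc_not_nonneg m),
        if_pos (by positivity : (0:Int) ≤ (c : Int)), pv_neg_negSucc_sub_one, Int.toNat_natCast]
    refine ⟨15 - (m &&& 15), by omega, ?_, ?_, ?_, ?_, ?_, ?_, ?_, ?_, ?_⟩
    · rw [show ((15:Int)) = ((15:Nat):Int) from rfl, hband 15, hsw 15 rfl]
      congr 1
      set t := m &&& 15
      interval_cases t <;> rfl
    · rw [show ((1:Int)) = ((1:Nat):Int) from rfl, hband 1, hsw 1 rfl]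
      congr 1
      set t := m &&& 15
      interval_cases t <;> rfl
    · rw [show ((2:Int)) = ((2:Nat):Int) from rfl, hband 2, hsw 2 rfl]
      congr 1
      set t := m &&& 15
      interval_cases t <;> rfl
    · rw [show ((4:Int)) = ((4:Nat):Int) from rfl, hband 4, hsw 4 rfl]
      congr 1
      set t := m &&& 15
      interval_cases t <;> rfl
    · rw [show ((8:Int)) = ((8:Nat):Int) from rfl, hband 8, hsw 8 rfl]
      congr 1
      set t := m &&& 15
      interval_cases t <;> rfl
    all_goals {
      simp only [Int.testBit]
      have hm : ∀ j, j < 4 → m.testBit j = (m &&& 15).testBit j := by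
        intro j hj
        rw [Nat.testBit_and]
        have : (15:Nat).testBit j = true := by interval_cases j <;> rfl
        simp [this]
      rw [hm _ (by omega)]
      set t := m &&& 15
      interval_cases t <;> rfl
    }

-- the fold computes bitwise all / any
theorem pv_fold_band (l : List Int) (a : Int) (j : Nat) :
    (l.foldl PySem.Int.band a).testBit j = (a.testBit j && l.all (fun p => p.testBit j)) := by
  induction l generalizing a with
  | nil => simp
  | cons p t ih => simp [List.foldl, ih, pv_testBit_band, Bool.and_assoc]

theorem pv_fold_bor (l : List Int) (a : Int) (j : Nat) :
    (l.foldl PySem.Int.bor a).testBit j = (a.testBit j || l.any (fun p => p.testBit j)) := by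
  induction l generalizing a with
  | nil => simp
  | cons p t ih => simp [List.foldl, ih, pv_testBit_bor, Bool.or_assoc]

theorem pv_fold_pair (l : List Int) (x y : Int) :
    l.foldl (fun (st : Int × Int) p => (PySem.Int.band st.1 p, PySem.Int.bor st.2 p)) (x, y) =
      (l.foldl PySem.Int.band x, l.foldl PySem.Int.bor y) := by
  induction l generalizing x y with
  | nil => rfl
  | cons p t ih => simp [List.foldl, ih]

-- the two nibble tests, phrased through the four low bits
theorem pv_band15_ne_zero (x : Int) :
    (PySem.Int.band x 15 != 0) = (x.testBit 0 || x.testBit 1 || x.testBit 2 || x.testBit 3) := by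
  obtain ⟨k, hk, he, -, -, -, -, h0, h1, h2, h3⟩ := pv_nibble x
  rw [he, h0, h1, h2, h3]
  interval_cases k <;> decide

theorem pv_band15_ne_fifteen (x : Int) :
    (PySem.Int.band x 15 != 15) = (!x.testBit 0 || !x.testBit 1 || !x.testBit 2 || !x.testBit 3) := by
  obtain ⟨k, hk, he, -, -, -, -, h0, h1, h2, h3⟩ := pv_nibble x
  rw [he, h0, h1, h2, h3]
  interval_cases k <;> decide

-- A's per-piece test at each of the four masks is a testBit
theorem pv_mask0 (p : Int) : (PySem.Int.band p 1 != 0) = p.testBit 0 := by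
  obtain ⟨k, hk, -, he, -, -, -, h0, -, -, -⟩ := pv_nibble p
  rw [he, h0]; interval_cases k <;> decide

theorem pv_mask1 (p : Int) : (PySem.Int.band p 2 != 0) = p.testBit 1 := by
  obtain ⟨k, hk, -, -, he, -, -, -, h1, -, -⟩ := pv_nibble p
  rw [he, h1]; interval_cases k <;> decide

theorem pv_mask2 (p : Int) : (PySem.Int.band p 4 != 0) = p.testBit 2 := by
  obtain ⟨k, hk, -, -, -, he, -, -, -, h2, -⟩ := pv_nibble p
  rw [he, h2]; interval_cases k <;> decide

theorem pv_mask3 (p : Int) : (PySem.Int.band p 8 != 0) = p.testBit 3 := by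
  obtain ⟨k, hk, -, -, -, -, he, -, -, -, h3⟩ := pv_nibble p
  rw [he, h3]; interval_cases k <;> decide

-- the Bool regrouping identity
theorem pv_regroup (x0 x1 x2 x3 y0 y1 y2 y3 : Bool) :
    ((x0 || y0) || ((x1 || y1) || ((x2 || y2) || (x3 || y3)))) =
      ((x0 || x1 || x2 || x3) || (y0 || y1 || y2 || y3)) := by
  cases x0 <;> cases x1 <;> cases x2 <;> cases x3 <;> cases y0 <;> cases y1 <;> cases y2 <;> cases y3 <;> rfl

-- ===== VERDICT (by name: the statement is the Claim_ definition above) =====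
theorem pieces_share_attribute_spec : Claim_equal_pieces_share_attribute := by
  intro pieces _
  unfold Spec_pieces_share_attribute pieces_share_attribute pieces_share_attribute_alt
  by_cases h : pieces.length < 2
  · simp [h]
  · simp only [h, if_false]
    rw [pv_fold_pair]
    rw [pv_band15_ne_zero, pv_band15_ne_fifteen]
    simp only [pv_fold_band, pv_fold_bor]
    have h15 : ((15:Int)).testBit 0 = true ∧ ((15:Int)).testBit 1 = true ∧
        ((15:Int)).testBit 2 = true ∧ ((15:Int)).testBit 3 = true := by decide
    have h0 : ∀ j, ((0:Int)).testBit j = false := by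
      intro j; simp [Int.testBit, Nat.testBit]
    rw [h15.1, h15.2.1, h15.2.2.1, h15.2.2.2]
    simp only [h0, Bool.true_and, Bool.false_or]
    have hrange : PySem.List.pyRange 0 4 1 = [0, 1, 2, 3] := by decide
    rw [hrange]
    simp only [List.any_cons, List.any_nil, List.all_map, List.any_map, Function.comp_def]
    have e0 : (fun p => PySem.Int.band p ((1:Int) <<< ((0:Int)).toNat) != 0) =
        (fun p : Int => p.testBit 0) := funext fun p => pv_mask0 p
    have e1 : (fun p => PySem.Int.band p ((1:Int) <<< ((1:Int)).toNat) != 0) =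
        (fun p : Int => p.testBit 1) := funext fun p => pv_mask1 p
    have e2 : (fun p => PySem.Int.band p ((1:Int) <<< ((2:Int)).toNat) != 0) =
        (fun p : Int => p.testBit 2) := funext fun p => pv_mask2 p
    have e3 : (fun p => PySem.Int.band p ((1:Int) <<< ((3:Int)).toNat) != 0) =
        (fun p : Int => p.testBit 3) := funext fun p => pv_mask3 p
    rw [e0, e1, e2, e3, Bool.or_false]
    exact pv_regroup _ _ _ _ _ _ _ _
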